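-- pv_equiv track=rewrite | github.com/Manas2103/ATS-Scorer | parsing.py | create_dictionary_from_text
-- ===== SOURCE A (Python) =====
-- def create_dictionary_from_text(lines):
--     dictionary = {}
--     current_heading = None
--
--     for line in lines:
--         if line.strip():
--             words = line.strip().split()
--
--             if len(words) == 1:
--                 current_heading = words[0]
--                 dictionary[current_heading] = []
--
--             else:
--                 if current_heading:
--                     dictionary[current_heading].append(line.strip())
--
--     return dictionary
-- ===== SOURCE B (Python) =====
-- def create_dictionary_from_text(lines):
--     stripped = [l.strip() for l in lines]
--     segments = []
--     i, n = 0, len(stripped)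
--     while i < n:
--         s = stripped[i]
--         i += 1
--         if s and len(s.split()) == 1:
--             content = []
--             while i < n and not (stripped[i] and len(stripped[i].split()) == 1):
--                 if stripped[i]:
--                     content.append(stripped[i])
--                 i += 1
--             segments.append((s.split()[0], content))
--     d = {}
--     for key, content in segments:
--         d[key] = content
--     return d
-- ===== Notes on version B (the rewrite author's own statement) =====
-- stated objective: alternative
-- what changed: Replaces A's single stateful pass (current-heading variable, dict values mutated by append) with a segment scan: a nested two-level loop first cuts the stripped lines into (heading, content-block) segments, then a separate dict-assignment loop inserts each whole segment at once (last segment wins on duplicate headings, key keeps first position).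
import Mathlib
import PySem

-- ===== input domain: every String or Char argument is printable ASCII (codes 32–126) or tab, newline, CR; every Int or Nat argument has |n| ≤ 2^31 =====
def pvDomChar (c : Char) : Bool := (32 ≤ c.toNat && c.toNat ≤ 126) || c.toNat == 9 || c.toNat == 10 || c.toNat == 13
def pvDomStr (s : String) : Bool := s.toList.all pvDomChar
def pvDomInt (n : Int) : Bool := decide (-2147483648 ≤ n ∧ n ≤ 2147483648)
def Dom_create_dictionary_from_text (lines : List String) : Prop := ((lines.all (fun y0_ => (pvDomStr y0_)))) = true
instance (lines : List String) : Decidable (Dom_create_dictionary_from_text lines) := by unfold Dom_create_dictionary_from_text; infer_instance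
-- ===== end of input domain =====

-- B replaces A's single stateful pass (current-heading variable, append-mutated dict values) with a
-- two-phase segment scan: cut the stripped lines into (heading, content-block) segments, then insert
-- each whole segment into the dict; same return value (alternative decomposition, no speed claim).


-- ===== PORT A =====
-- loop body of A, applied to the already-stripped line (A computes line.strip() first and uses only it)
def pvCoreA (st : PySem.Dict String (List String) × Option String) (s : String) :
    PySem.Dict String (List String) × Option String :=
  if s ≠ "" then
    let words := PySem.Str.split₀ s
    if words.length = 1 then
      let w := words.headD ""
      (st.1.insert w [], some w)
    else
      match st.2 with
      | some h => if h ≠ "" then (st.1.insert h (st.1.getD h [] ++ [s]), st.2) else st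
      | none => st
  else st

def create_dictionary_from_text (lines : List String) : List (String × List String) :=
  (lines.foldl (fun st line => pvCoreA st (PySem.Str.strip line)) (PySem.Dict.empty, none)).1.items

-- ===== PORT B =====
def pvIsHead (s : String) : Bool := s ≠ "" && (PySem.Str.split₀ s).length == 1

-- inner loop of B: collect the non-empty content lines up to (excluding) the next heading
def pvTakeContent : List String → List String × List String
  | [] => ([], [])
  | s :: rest =>
    if pvIsHead s then ([], s :: rest)
    else
      let p := pvTakeContent rest
      (if s ≠ "" then s :: p.1 else p.1, p.2)

theorem pvTakeContent_len : ∀ rest : List String, (pvTakeContent rest).2.length ≤ rest.length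
  | [] => by simp [pvTakeContent]
  | s :: rest => by
    by_cases h : pvIsHead s <;> simp [pvTakeContent, h]
    all_goals exact Nat.le_succ_of_le (pvTakeContent_len rest)

-- outer loop of B: the (heading word, content block) segments in order
def pvSegments : List String → List (String × List String)
  | [] => []
  | s :: rest =>
    if pvIsHead s then
      let p := pvTakeContent rest
      ((PySem.Str.split₀ s).headD "", p.1) :: pvSegments p.2
    else pvSegments rest
termination_by l => l.length
decreasing_by
  · exact Nat.lt_succ_of_le (pvTakeContent_len rest)
  · exact Nat.lt_succ_self _

def create_dictionary_from_text_alt (lines : List String) : List (String × List String) :=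
  ((pvSegments (lines.map PySem.Str.strip)).foldl
    (fun d p => d.insert p.1 p.2) PySem.Dict.empty).items

-- ===== PRECONDITION & SPEC =====
def Spec_create_dictionary_from_text (lines : List String) (out : List (String × List String)) : Prop := out = create_dictionary_from_text_alt lines
instance (lines : List String) (out : List (String × List String)) : Decidable (Spec_create_dictionary_from_text lines out) := by unfold Spec_create_dictionary_from_text; infer_instance

-- ===== CLAIM (what is proved, stated in full; the proofs are below) =====
def Claim_equal_create_dictionary_from_text : Prop := ∀ (lines : List String), Dom_create_dictionary_from_text lines → Spec_create_dictionary_from_text lines (create_dictionary_from_text lines)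

-- ===== LEMMAS AND PROOFS =====

-- a word produced by Python's str.split() is never empty
theorem pv_split_go_ne_nil : ∀ (s cur : List Char) (acc : List (List Char)),
    (∀ w ∈ acc, w ≠ []) → ∀ w ∈ PySem.Chars.split₀.go s cur acc, w ≠ [] := by
  intro s
  induction s with
  | nil =>
    intro cur acc hacc w hw
    by_cases hc : cur.isEmpty <;> simp [PySem.Chars.split₀.go, hc] at hw
    · exact hacc _ hw
    · rcases hw with hw | hw
      · exact hacc _ hw
      · subst hw; simpa [List.isEmpty_iff] using hc
  | cons c rest ih =>
    intro cur acc hacc w hw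
    by_cases hsp : PySem.Chars.isspace c
    · by_cases hc : cur.isEmpty
      · simp only [PySem.Chars.split₀.go, hsp, hc, if_true] at hw
        exact ih [] acc hacc w hw
      · simp only [PySem.Chars.split₀.go, hsp, hc, if_true] at hw
        refine ih [] (cur.reverse :: acc) ?_ w hw
        intro v hv
        rcases List.mem_cons.mp hv with h1 | h1
        · subst h1; simpa [List.isEmpty_iff] using hc
        · exact hacc _ h1
    · simp only [PySem.Chars.split₀.go, hsp] at hw
      exact ih (c :: cur) acc hacc w hw

theorem pv_mem_split₀_ne_nil (cs : List Char) (w : List Char)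
    (hw : w ∈ PySem.Chars.split₀ cs) : w ≠ [] :=
  pv_split_go_ne_nil cs [] [] (by simp) w hw

theorem pv_head_ne_empty (s : String) (hh : pvIsHead s = true) :
    (PySem.Str.split₀ s).headD "" ≠ "" := by
  have hlen : (PySem.Str.split₀ s).length = 1 := by
    simp [pvIsHead] at hh; exact hh.2
  obtain ⟨w, hw⟩ : ∃ w, PySem.Str.split₀ s = [w] := by
    cases h : PySem.Str.split₀ s with
    | nil => simp [h] at hlen
    | cons a t => cases t with
      | nil => exact ⟨a, rfl⟩
      | cons b u => simp [h] at hlen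
  have hmem : w.toList ∈ PySem.Chars.split₀ s.toList := by
    have := PySem.Str.split₀_map_toList s
    rw [hw] at this
    simp [← this]
  have := pv_mem_split₀_ne_nil s.toList w.toList hmem
  rw [hw]
  simpa using this

def pvInsF (d : PySem.Dict String (List String)) (p : String × List String) :
    PySem.Dict String (List String) := d.insert p.1 p.2

-- A's fold from a "heading active" state equals inserting the whole pending block, then continuing
theorem pv_lemB : ∀ (L : List String) (d : PySem.Dict String (List String)) (h : String)
    (acc : List String), h ≠ "" →
    (L.foldl pvCoreA (d.insert h acc, some h)).1 =
      ((pvSegments (pvTakeContent L).2).foldl pvInsF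
        (d.insert h (acc ++ (pvTakeContent L).1))) := by
  intro L
  induction L with
  | nil => intro d h acc hne; simp [pvTakeContent, pvSegments]
  | cons s rest ih =>
    intro d h acc hne
    by_cases hh : pvIsHead s
    · have hs : s ≠ "" := by simp [pvIsHead] at hh; exact hh.1
      have hl : (PySem.Str.split₀ s).length = 1 := by simp [pvIsHead] at hh; exact hh.2
      have hwne := pv_head_ne_empty s hh
      simp only [List.foldl_cons, pvCoreA, hs, if_true, ne_eq, not_false_iff, hl]
      rw [ih (d.insert h acc) _ [] hwne]
      simp only [pvTakeContent, hh, if_true, pvSegments, List.foldl_cons]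
      simp [pvInsF]
    · by_cases hs : s = ""
      · simp only [List.foldl_cons, pvCoreA, hs, ne_eq, not_true, if_false]
        rw [ih d h acc hne]
        simp [pvTakeContent, pvIsHead]
      · have hl : (PySem.Str.split₀ s).length ≠ 1 := by
          intro hc; exact hh (by simp [pvIsHead, hs, hc])
        simp only [List.foldl_cons, pvCoreA, hs, ne_eq, not_false_iff, if_true, hl, if_false,
          hne]
        rw [PySem.Dict.getD_insert_self, PySem.Dict.insert_insert_self]
        rw [ih d h (acc ++ [s]) hne]
        simp [pvTakeContent, hh, hs, List.append_assoc]

-- A's fold from the initial (no heading yet) state equals B's segment fold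
theorem pv_lemA : ∀ (L : List String) (d : PySem.Dict String (List String)),
    (L.foldl pvCoreA (d, none)).1 = (pvSegments L).foldl pvInsF d := by
  intro L
  induction L with
  | nil => intro d; simp [pvSegments]
  | cons s rest ih =>
    intro d
    by_cases hh : pvIsHead s
    · have hs : s ≠ "" := by simp [pvIsHead] at hh; exact hh.1
      have hl : (PySem.Str.split₀ s).length = 1 := by simp [pvIsHead] at hh; exact hh.2
      have hwne := pv_head_ne_empty s hh
      simp only [List.foldl_cons, pvCoreA, hs, ne_eq, not_false_iff, if_true, hl]
      rw [pv_lemB rest d _ [] hwne]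
      simp only [pvSegments, hh, if_true, List.foldl_cons]
      simp [pvInsF]
    · by_cases hs : s = ""
      · simp only [List.foldl_cons, pvCoreA, hs, ne_eq, not_true, if_false]
        rw [ih d]
        simp [pvSegments, pvIsHead]
      · have hl : (PySem.Str.split₀ s).length ≠ 1 := by
          intro hc; exact hh (by simp [pvIsHead, hs, hc])
        simp only [List.foldl_cons, pvCoreA, hs, ne_eq, not_false_iff, if_true, hl, if_false]
        rw [ih d]
        simp [pvSegments, hh]

-- ===== VERDICT (by name: the statement is the Claim_ definition above) =====
theorem create_dictionary_from_text_spec : Claim_equal_create_dictionary_from_text := by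
  intro lines _
  unfold Spec_create_dictionary_from_text create_dictionary_from_text create_dictionary_from_text_alt
  rw [← List.foldl_map (f := PySem.Str.strip) (g := pvCoreA)]
  rw [pv_lemA (lines.map PySem.Str.strip) PySem.Dict.empty]
  rfl
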